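-- pv_equiv track=rewrite | github.com/Zuzen56/leetcode | 66.py | func
-- ===== SOURCE A (Python) =====
-- def func(digits):
--     n = len(digits)
--     for i in range(n - 1, -1, -1):
--         if digits[i] != 9:
--             digits[i] += 1
--             for j in range(i + 1, n):
--                 digits[j] = 0
--             return digits
--
--     # digits 中所有的元素均为 9
--     return [1] + [0] * n
-- ===== SOURCE B (Python) =====
-- def func(digits):
--     # structural recursion on the last element: if it is not 9 increment it,
--     # otherwise increment the prefix recursively and append a 0 (non-mutating)
--     if not digits:
--         return [1]
--     *init, last = digits
--     if last != 9:
--         return init + [last + 1]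
--     return func(init) + [0]
-- ===== Notes on version B (the rewrite author's own statement) =====
-- stated objective: simpler
-- what changed: B replaces A's two index loops (backward scan for the rightmost non-9, then an inner loop zeroing the tail in place) by non-mutating structural recursion on the last element: increment it if it is not 9, otherwise recursively increment the prefix and append a 0.
import Mathlib
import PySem

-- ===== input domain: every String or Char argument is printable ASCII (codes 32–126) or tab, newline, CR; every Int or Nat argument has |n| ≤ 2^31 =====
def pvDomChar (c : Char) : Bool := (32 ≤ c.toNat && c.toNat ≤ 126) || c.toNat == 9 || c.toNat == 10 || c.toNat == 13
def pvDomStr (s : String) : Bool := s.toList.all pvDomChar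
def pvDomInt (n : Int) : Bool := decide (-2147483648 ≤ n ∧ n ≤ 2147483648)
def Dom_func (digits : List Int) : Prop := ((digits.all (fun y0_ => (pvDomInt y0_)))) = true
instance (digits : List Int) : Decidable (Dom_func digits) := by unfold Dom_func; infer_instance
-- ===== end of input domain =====

-- B replaces A's two index loops (find rightmost non-9, then zero the tail in place) by
-- non-mutating structural recursion on the last element; the equivalence is about the RETURN
-- value only (A mutates its argument except in the all-nines case, B never does).

-- ===== PORT A =====
-- the 'for i in range(n-1,-1,-1)' loop; counter i+1 means "next index to inspect is i";
-- indices are always in range, so digits[i] is pyGetD; the inner zeroing loop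
-- 'for j in range(i+1,n): digits[j] = 0' yields the replicate tail of the returned list
def funcGo (digits : List Int) : Nat → List Int
  | 0 => 1 :: List.replicate digits.length 0
  | i + 1 =>
      let d := PySem.List.pyGetD digits (i : Int) 0
      if d ≠ 9 then
        digits.take i ++ (d + 1) :: List.replicate (digits.length - i - 1) 0
      else
        funcGo digits i

def func (digits : List Int) : List Int := funcGo digits digits.length

-- ===== PORT B =====
-- Source B: 'if not digits: return [1]', '*init, last = digits' (dropLast/getLast),
-- then either 'init + [last + 1]' or the recursive call 'func(init) + [0]'
def func_alt (digits : List Int) : List Int :=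
  if h : digits = [] then
    [1]
  else
    let last := digits.getLast h
    if last ≠ 9 then
      digits.dropLast ++ [last + 1]
    else
      func_alt digits.dropLast ++ [0]
termination_by digits.length
decreasing_by
  simpa [List.length_dropLast] using Nat.sub_lt (List.length_pos_iff.mpr h) one_pos

-- ===== PRECONDITION & SPEC =====
def Spec_func (digits : List Int) (out : List Int) : Prop := out = func_alt digits
instance (digits : List Int) (out : List Int) : Decidable (Spec_func digits out) := by unfold Spec_func; infer_instance

-- ===== CLAIM (what is proved, stated in full; the proofs are below) =====
def Claim_equal_func : Prop := ∀ (digits : List Int), Dom_func digits → Spec_func digits (func digits)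

-- ===== LEMMAS AND PROOFS =====

-- B's equations on a concat, matching the two branches of Source B
theorem func_alt_nil : func_alt [] = [1] := by
  rw [func_alt]
  simp

theorem func_alt_concat (ds : List Int) (x : Int) :
    func_alt (ds ++ [x]) = if x ≠ 9 then ds ++ [x + 1] else func_alt ds ++ [0] := by
  rw [func_alt]
  simp

-- appending a trailing 9 makes A's loop emit one more trailing 0
theorem funcGo_concat_nine (ds : List Int) (i : Nat) (hi : i ≤ ds.length) :
    funcGo (ds ++ [9]) i = funcGo ds i ++ [0] := by
  induction i with
  | zero =>
      simp [funcGo, List.replicate_succ']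
  | succ i ih =>
      have hlt : i < ds.length := by omega
      have hget : PySem.List.pyGetD (ds ++ [9]) (i : Int) 0 = PySem.List.pyGetD ds (i : Int) 0 := by
        rw [PySem.List.pyGetD_natCast, PySem.List.pyGetD_natCast,
          List.getD_eq_getElem _ 0 (by simp; omega), List.getD_eq_getElem _ 0 hlt,
          List.getElem_append_left hlt]
      by_cases hd : PySem.List.pyGetD ds (i : Int) 0 = 9
      · simp only [funcGo, hget, hd, ne_eq, not_true_eq_false, if_false]
        exact ih (by omega)
      · simp only [funcGo, hget, ne_eq, hd, not_false_eq_true, if_true]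
        rw [List.take_append_of_le_length (by omega)]
        have hlen : (ds ++ [9]).length - i - 1 = (ds.length - i - 1) + 1 := by
          simp; omega
        rw [hlen, List.replicate_succ']
        simp

theorem func_eq_alt (digits : List Int) : func digits = func_alt digits := by
  induction digits using List.reverseRecOn with
  | nil => simp [func, funcGo, func_alt_nil]
  | append_singleton ds x ih =>
      by_cases hx : x = 9
      · subst hx
        have hlen : (ds ++ [9]).length = ds.length + 1 := by simp
        have hget : PySem.List.pyGetD (ds ++ [9]) ((ds.length : Nat) : Int) 0 = 9 := by
          rw [PySem.List.pyGetD_natCast, List.getD_eq_getElem _ 0 (by simp),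
            List.getElem_append_right (le_refl _)]
          simp
        have h1 : func (ds ++ [9]) = funcGo (ds ++ [9]) ds.length := by
          rw [func, hlen]
          simp only [funcGo, hget, ne_eq, not_true_eq_false, if_false]
        rw [h1, funcGo_concat_nine ds ds.length (le_refl _), ← func, ih,
          func_alt_concat]
        simp
      · have hget : PySem.List.pyGetD (ds ++ [x]) ((ds.length : Nat) : Int) 0 = x := by
          rw [PySem.List.pyGetD_natCast, List.getD_eq_getElem _ 0 (by simp),
            List.getElem_append_right (le_refl _)]
          simp
        have hlen : (ds ++ [x]).length = ds.length + 1 := by simp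
        rw [func, hlen]
        simp only [funcGo, hget, ne_eq, hx, not_false_eq_true, if_true]
        rw [List.take_append_of_le_length (le_refl _), List.take_length, func_alt_concat]
        simp [hx]

-- ===== VERDICT (by name: the statement is the Claim_ definition above) =====
theorem func_spec : Claim_equal_func := by
  intro digits _
  show func digits = func_alt digits
  exact func_eq_alt digits
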